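-- pv_equiv track=rewrite | github.com/lorenzocesconetto/sumo-traffic | sumoTools/simulationHelpers.py | get_max_min_vectors_from_list_of_lists
-- ===== SOURCE A (Python) =====
-- def get_size_of_smallest_list(data: list):
--     """Gets the smallest length of all lists inside the data list of lists"""
--     size = len(data[0])
--     for d in data:
--         if len(d) < size:
--             size = len(d)
--     return size
--
-- def get_max_min_vectors_from_list_of_lists(data: list):
--     """
--         Gets the minimum and the maximum values of the
--         corresponding elements in a list of lists.
--         returns a dictionary with two lists as
--         {'maximum': [max_i, max_i+1, ...], 'minimum': [min_i, min_i+1, ...]}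
--     """
--     # Get length of shortest list
--     size_of_output_vector = get_size_of_smallest_list(data)
--
--     #   Make min and max vectors
--     maximum_vector = [0] * size_of_output_vector
--     minimum_vector = [0] * size_of_output_vector
--     for i in range(size_of_output_vector):
--         temporary_minimum = temporary_maximum = data[0][i]
--         for d in data:
--             if temporary_minimum > d[i]:
--                 temporary_minimum = d[i]
--             if temporary_maximum < d[i]:
--                 temporary_maximum = d[i]
--         maximum_vector[i] = temporary_maximum
--         minimum_vector[i] = temporary_minimum
--     return {'maximum': maximum_vector, 'minimum': minimum_vector}
-- ===== SOURCE B (Python) =====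
-- def get_max_min_vectors_from_list_of_lists(data: list):
--     # Single streaming pass over the rows: keep running max/min vectors,
--     # which zip-truncation shrinks to the shortest row's length as rows arrive.
--     maximum_vector = minimum_vector = data[0]
--     for row in data[1:]:
--         maximum_vector = [a if a > b else b for a, b in zip(maximum_vector, row)]
--         minimum_vector = [a if a < b else b for a, b in zip(minimum_vector, row)]
--     return {'maximum': maximum_vector, 'minimum': minimum_vector}
-- ===== Notes on version B (the rewrite author's own statement) =====
-- stated objective: alternative
-- what changed: Replaces A's precomputed-shortest-length plus column-indexed nested comparison loops by a single row-wise streaming pass that folds each row into running max/min accumulator vectors, zip-truncation handling the shortest-length cut implicitly.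
import Mathlib
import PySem

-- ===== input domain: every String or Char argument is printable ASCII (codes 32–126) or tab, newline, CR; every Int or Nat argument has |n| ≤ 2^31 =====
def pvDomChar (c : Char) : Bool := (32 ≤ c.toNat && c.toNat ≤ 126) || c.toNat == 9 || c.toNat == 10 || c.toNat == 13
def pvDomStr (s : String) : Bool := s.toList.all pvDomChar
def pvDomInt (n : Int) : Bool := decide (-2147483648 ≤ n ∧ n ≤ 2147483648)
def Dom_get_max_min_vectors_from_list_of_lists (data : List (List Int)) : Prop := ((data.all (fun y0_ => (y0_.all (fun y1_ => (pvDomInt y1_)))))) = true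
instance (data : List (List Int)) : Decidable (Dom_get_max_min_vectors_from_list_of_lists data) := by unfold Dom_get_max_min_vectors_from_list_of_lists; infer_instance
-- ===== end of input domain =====

-- B replaces A's precomputed-shortest-length + column-indexed nested loops by a single
-- row-wise streaming pass folding each row into running max/min accumulator vectors
-- (alternative decomposition; same cost).

-- ===== PORT A =====
def pvGetSizeOfSmallestList (data : List (List Int)) : Int :=
  let size : Int := (PySem.List.pyGetD data 0 []).length
  data.foldl (fun size d => if (d.length : Int) < size then (d.length : Int) else size) size

def get_max_min_vectors_from_list_of_lists (data : List (List Int)) : List (String × List Int) :=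
  let n := pvGetSizeOfSmallestList data
  let res := (PySem.List.pyRange 0 n 1).foldl
    (fun (acc : List Int × List Int) i =>
      let t0 := PySem.List.pyGetD (PySem.List.pyGetD data 0 []) i 0
      let p := data.foldl
        (fun (p : Int × Int) d =>
          (if p.1 > PySem.List.pyGetD d i 0 then PySem.List.pyGetD d i 0 else p.1,
           if p.2 < PySem.List.pyGetD d i 0 then PySem.List.pyGetD d i 0 else p.2))
        (t0, t0)
      (acc.1.set i.toNat p.2, acc.2.set i.toNat p.1))
    (List.replicate n.toNat (0 : Int), List.replicate n.toNat (0 : Int))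
  [("maximum", res.1), ("minimum", res.2)]

-- ===== PORT B =====
-- streaming pass: fold the remaining rows into running max/min accumulator vectors;
-- zip (List.zipWith) truncates to the shorter operand exactly as Python's zip does
def get_max_min_vectors_from_list_of_lists_alt (data : List (List Int)) : List (String × List Int) :=
  let first := PySem.List.pyGetD data 0 []
  let p := (PySem.List.slice data (some 1) none).foldl
    (fun (p : List Int × List Int) row =>
      (List.zipWith (fun a b => if a > b then a else b) p.1 row,
       List.zipWith (fun a b => if a < b then a else b) p.2 row))
    (first, first)
  [("maximum", p.1), ("minimum", p.2)]

-- ===== PRECONDITION & SPEC =====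
-- Pre_ excludes only the empty outer list, on which A raises IndexError at data[0].
def Pre_get_max_min_vectors_from_list_of_lists (data : List (List Int)) : Prop := data ≠ []
instance (data : List (List Int)) : Decidable (Pre_get_max_min_vectors_from_list_of_lists data) := by unfold Pre_get_max_min_vectors_from_list_of_lists; infer_instance
def pvWitness_get_max_min_vectors_from_list_of_lists : List (List Int) := [[1, 2], [3]]

def Spec_get_max_min_vectors_from_list_of_lists (data : List (List Int)) (out : List (String × List Int)) : Prop := out = get_max_min_vectors_from_list_of_lists_alt data
instance (data : List (List Int)) (out : List (String × List Int)) : Decidable (Spec_get_max_min_vectors_from_list_of_lists data out) := by unfold Spec_get_max_min_vectors_from_list_of_lists; infer_instance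

-- ===== CLAIM (what is proved, stated in full; the proofs are below) =====
def Claim_equal_get_max_min_vectors_from_list_of_lists : Prop := ∀ (data : List (List Int)), Dom_get_max_min_vectors_from_list_of_lists data → Pre_get_max_min_vectors_from_list_of_lists data → Spec_get_max_min_vectors_from_list_of_lists data (get_max_min_vectors_from_list_of_lists data)

-- ===== LEMMAS AND PROOFS =====
-- proof-side helpers
def colAt (data : List (List Int)) (k : Nat) : List Int := data.map (fun d => d.getD k 0)
def minLen (data : List (List Int)) : Nat := (data.map List.length).foldl min data.headI.length

theorem foldl_if_min (l : List (List Int)) (s : Nat) :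
    l.foldl (fun (size : Int) d => if (d.length : Int) < size then (d.length : Int) else size) (s : Int)
      = (((l.map List.length).foldl min s : Nat) : Int) := by
  induction l generalizing s with
  | nil => simp
  | cons a t ih =>
      simp only [List.foldl_cons, List.map_cons]
      have h : (if ((a.length : Int) < (s : Int)) then (a.length : Int) else (s : Int))
          = ((min s a.length : Nat) : Int) := by split_ifs with h <;> omega
      rw [h, ih]

theorem size_eq (d0 : List Int) (rest : List (List Int)) :
    pvGetSizeOfSmallestList (d0 :: rest) = ((minLen (d0 :: rest) : Nat) : Int) := by
  simp only [pvGetSizeOfSmallestList, PySem.List.pyGetD_zero_cons, minLen, List.headI]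
  exact foldl_if_min _ _

theorem foldl_min_le (l : List Nat) (s : Nat) : l.foldl min s ≤ s := by
  induction l generalizing s with
  | nil => simp
  | cons a t ih => simpa using le_trans (ih (min s a)) (by omega)

theorem inner_fold (l : List (List Int)) (i : Nat) (a b : Int) :
    l.foldl (fun (p : Int × Int) d =>
        (if p.1 > d.getD i 0 then d.getD i 0 else p.1,
         if p.2 < d.getD i 0 then d.getD i 0 else p.2)) (a, b)
      = ((colAt l i).foldl min a, (colAt l i).foldl max b) := by
  induction l generalizing a b with
  | nil => simp [colAt]
  | cons d t ih =>
      simp only [List.foldl_cons, colAt, List.map_cons] at *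
      rw [ih]
      congr 1 <;> [skip; skip] <;> congr 1 <;> omega

theorem foldl_set_range (m : Nat) (f g : Nat → Int) (j : Nat) (hj : j ≤ m)
    (A0 B0 : List Int) (hA : A0.length = m) (hB : B0.length = m) :
    (List.range j).foldl (fun (acc : List Int × List Int) k => (acc.1.set k (f k), acc.2.set k (g k))) (A0, B0)
      = ((List.range j).map f ++ A0.drop j, (List.range j).map g ++ B0.drop j) := by
  induction j with
  | zero => simp
  | succ j ih =>
      rw [List.range_succ, List.foldl_append, ih (by omega)]
      have hjA : j < A0.length := by omega
      have hjB : j < B0.length := by omega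
      simp only [List.foldl_cons, List.foldl_nil, List.set_append, List.length_map,
        List.length_range, lt_irrefl, if_false, Nat.sub_self, List.map_append, List.map_cons,
        List.map_nil, List.drop_eq_getElem_cons hjA, List.drop_eq_getElem_cons hjB, List.set_cons_zero]
      simp

theorem portA_eq (d0 : List Int) (rest : List (List Int)) :
    get_max_min_vectors_from_list_of_lists (d0 :: rest) =
      [("maximum", (List.range (minLen (d0 :: rest))).map
          (fun k => (colAt rest k).foldl max (d0.getD k 0))),
       ("minimum", (List.range (minLen (d0 :: rest))).map
          (fun k => (colAt rest k).foldl min (d0.getD k 0)))] := by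
  have hfe : (fun (x : List Int × List Int) (y : Nat) =>
      (x.1.set y
          (List.foldl
              (fun (p : Int × Int) d =>
                (if p.1 > PySem.List.pyGetD d (y : Int) 0 then PySem.List.pyGetD d (y : Int) 0 else p.1,
                 if p.2 < PySem.List.pyGetD d (y : Int) 0 then PySem.List.pyGetD d (y : Int) 0 else p.2))
              (PySem.List.pyGetD (PySem.List.pyGetD (d0 :: rest) 0 []) (y : Int) 0,
               PySem.List.pyGetD (PySem.List.pyGetD (d0 :: rest) 0 []) (y : Int) 0)
              (d0 :: rest)).2,
       x.2.set y
          (List.foldl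
              (fun (p : Int × Int) d =>
                (if p.1 > PySem.List.pyGetD d (y : Int) 0 then PySem.List.pyGetD d (y : Int) 0 else p.1,
                 if p.2 < PySem.List.pyGetD d (y : Int) 0 then PySem.List.pyGetD d (y : Int) 0 else p.2))
              (PySem.List.pyGetD (PySem.List.pyGetD (d0 :: rest) 0 []) (y : Int) 0,
               PySem.List.pyGetD (PySem.List.pyGetD (d0 :: rest) 0 []) (y : Int) 0)
              (d0 :: rest)).1))
      = fun (acc : List Int × List Int) (k : Nat) =>
          (acc.1.set k ((colAt rest k).foldl max (d0.getD k 0)),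
           acc.2.set k ((colAt rest k).foldl min (d0.getD k 0))) := by
    funext acc k
    simp only [PySem.List.pyGetD_zero_cons, PySem.List.pyGetD_natCast,
      List.foldl_cons, gt_iff_lt, lt_irrefl, ite_self]
    rw [inner_fold]
  simp only [get_max_min_vectors_from_list_of_lists, size_eq, Int.toNat_natCast,
    PySem.List.pyRange_zero_nat, List.foldl_map]
  rw [hfe,
    foldl_set_range (minLen (d0 :: rest)) _ _ (minLen (d0 :: rest)) le_rfl _ _
      (by simp) (by simp)]
  simp

theorem pair_fold {α β γ : Type} (f : α → γ → α) (g : β → γ → β) (l : List γ) (a : α) (b : β) :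
    l.foldl (fun p row => (f p.1 row, g p.2 row)) (a, b) = (l.foldl f a, l.foldl g b) := by
  induction l generalizing a b with
  | nil => rfl
  | cons r t ih => simp only [List.foldl_cons, ih]

-- the streaming accumulator fold computes, at each surviving index, the fold of the column
theorem stream_fold (op : Int → Int → Int)
    (f : Int → Int → Int) (hf : ∀ a b, f a b = op a b)
    (l : List (List Int)) (v : List Int) :
    l.foldl (fun v row => List.zipWith f v row) v
      = (List.range ((l.map List.length).foldl min v.length)).map
          (fun k => (colAt l k).foldl op (v.getD k 0)) := by
  induction l generalizing v with
  | nil =>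
      simp only [List.foldl_nil, List.map_nil, colAt]
      refine List.ext_getElem (by simp) ?_
      intro i h1 h2
      simp [List.getElem?_eq_getElem h1]
  | cons r t ih =>
      simp only [List.foldl_cons, List.map_cons]
      rw [ih]
      have hlen : (List.zipWith f v r).length = min v.length r.length := by simp
      rw [hlen]
      refine List.map_congr_left ?_
      intro k hk
      have hk' : k < min v.length r.length :=
        lt_of_lt_of_le (List.mem_range.mp hk) (foldl_min_le _ _)
      have hz : (List.zipWith f v r).getD k 0 = op (v.getD k 0) (r.getD k 0) := by
        have h1 : k < v.length := by omega
        have h2 : k < r.length := by omega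
        have h3 : k < (List.zipWith f v r).length := by omega
        rw [List.getD_eq_getElem _ _ h3, List.getElem_zipWith,
          List.getD_eq_getElem _ _ h1, List.getD_eq_getElem _ _ h2, hf]
      simp only [colAt, List.map_cons, List.foldl_cons, hz]

theorem portB_eq (d0 : List Int) (rest : List (List Int)) :
    get_max_min_vectors_from_list_of_lists_alt (d0 :: rest) =
      [("maximum", (List.range (minLen (d0 :: rest))).map
          (fun k => (colAt rest k).foldl max (d0.getD k 0))),
       ("minimum", (List.range (minLen (d0 :: rest))).map
          (fun k => (colAt rest k).foldl min (d0.getD k 0)))] := by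
  have hmin : (rest.map List.length).foldl min d0.length = minLen (d0 :: rest) := by
    simp [minLen, List.headI, List.foldl_cons]
  simp only [get_max_min_vectors_from_list_of_lists_alt, PySem.List.pyGetD_zero_cons,
    PySem.List.slice_from_one, List.tail_cons]
  rw [pair_fold,
    stream_fold max (fun a b => if a > b then a else b) (by intro a b; simp [max_def]; omega) rest d0,
    stream_fold min (fun a b => if a < b then a else b) (by intro a b; simp [min_def]; omega) rest d0,
    hmin]

-- ===== VERDICT (by name: the statement is the Claim_ definition above) =====
theorem get_max_min_vectors_from_list_of_lists_spec : Claim_equal_get_max_min_vectors_from_list_of_lists := by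
  intro data _ hpre
  unfold Spec_get_max_min_vectors_from_list_of_lists
  cases data with
  | nil => exact absurd rfl hpre
  | cons d0 rest => rw [portA_eq, portB_eq]
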